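-- pv_equiv track=rewrite | github.com/yashwalker7/GFG-POTD | GFG/Dominant Pairs.py | dominantPairs
-- ===== SOURCE A (Python) =====
-- from typing import List
--
-- def dominantPairs(n : int, arr : List[int]) -> int:
--     # code here
--     arr[:n//2]=sorted(arr[:n//2])
--     arr[n//2:]=sorted(arr[n//2:])
--     a = 0
--     b = n//2
--     count=0
--
--     while a<n//2 and b<n:
--         if arr[a]>=5*arr[b]:
--             count+=n//2-a
--             b+=1
--         else:
--             a+=1
--
--     return count
-- ===== SOURCE B (Python) =====
-- from typing import List
--
-- def _lower_bound(a, lo, hi, x):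
--     # first index in [lo, hi) whose element is >= x (a[lo:hi] sorted ascending)
--     while lo < hi:
--         mid = (lo + hi) // 2
--         if a[mid] < x:
--             lo = mid + 1
--         else:
--             hi = mid
--     return lo
--
-- def dominantPairs(n: int, arr: List[int]) -> int:
--     arr[:n//2] = sorted(arr[:n//2])
--     arr[n//2:] = sorted(arr[n//2:])
--     half = n // 2
--     count = 0
--     for y in arr[half:n]:
--         count += half - _lower_bound(arr, 0, half, 5 * y)
--     return count
-- ===== Notes on version B (the rewrite author's own statement) =====
-- stated objective: alternative
-- what changed: Replaces A's two-pointer merge over the two sorted halves with a per-element binary search (hand-rolled lower bound) over the sorted first half, accumulating n//2 - idx for each second-half element.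
-- outside the precondition, e.g. on dominantPairs(3, [0, 100]): A returns 0, B returns 0
import Mathlib
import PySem

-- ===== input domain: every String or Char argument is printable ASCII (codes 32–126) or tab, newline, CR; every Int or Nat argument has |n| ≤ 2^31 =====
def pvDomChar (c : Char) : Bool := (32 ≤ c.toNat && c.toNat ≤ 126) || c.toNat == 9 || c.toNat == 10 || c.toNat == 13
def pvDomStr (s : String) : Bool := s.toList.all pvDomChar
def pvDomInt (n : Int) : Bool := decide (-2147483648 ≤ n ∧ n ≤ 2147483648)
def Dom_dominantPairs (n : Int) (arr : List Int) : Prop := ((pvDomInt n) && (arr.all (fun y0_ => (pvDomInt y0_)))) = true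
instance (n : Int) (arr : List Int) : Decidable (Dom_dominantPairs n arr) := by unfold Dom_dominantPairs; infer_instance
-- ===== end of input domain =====

-- B replaces A's two-pointer merge over the two sorted halves by a per-element binary search
-- (hand-rolled lower bound) over the sorted first half; equal cost, different algorithm.
-- Both Pythons mutate arr identically (sorting both halves in place); the theorems are about the return value.

-- ===== PORT A =====
-- the while loop of A: state (a, b, count); pyGetD is in range on every reachable state inside Pre_
def loopA (L : List Int) (h n a b count : Int) : Int :=
  if hg : a < h ∧ b < n then
    if 5 * PySem.List.pyGetD L b 0 ≤ PySem.List.pyGetD L a 0 then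
      loopA L h n a (b + 1) (count + (h - a))
    else
      loopA L h n (a + 1) b count
  else count
termination_by ((n - b).toNat + (h - a).toNat)
decreasing_by all_goals (obtain ⟨h1, h2⟩ := hg; omega)

def dominantPairs (n : Int) (arr : List Int) : Int :=
  let h := PySem.Int.floordiv n 2
  -- arr[:n//2] = sorted(arr[:n//2])
  let a1 := PySem.List.sorted (PySem.List.slice arr none (some h)) (fun x => x) false
              ++ PySem.List.slice arr (some h) none
  -- arr[n//2:] = sorted(arr[n//2:])
  let a2 := PySem.List.slice a1 none (some h)
              ++ PySem.List.sorted (PySem.List.slice a1 (some h) none) (fun x => x) false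
  loopA a2 h n 0 h 0

-- ===== PORT B =====
-- the while loop of B's _lower_bound: first index in [lo, hi) whose element is >= x
def lbB (L : List Int) (x lo hi : Int) : Int :=
  if hg : lo < hi then
    let mid := PySem.Int.floordiv (lo + hi) 2
    if PySem.List.pyGetD L mid 0 < x then lbB L x (mid + 1) hi else lbB L x lo mid
  else lo
termination_by (hi - lo).toNat
decreasing_by
  all_goals
    (have hb := PySem.Int.floordiv_two_mid_bounds (le_of_lt hg)
     have hb2 : PySem.Int.floordiv (lo + hi) 2 < hi := by
       rw [PySem.Int.floordiv_lt_iff_lt_mul (by omega)]; omega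
     omega)

def dominantPairs_alt (n : Int) (arr : List Int) : Int :=
  let h := PySem.Int.floordiv n 2
  let a1 := PySem.List.sorted (PySem.List.slice arr none (some h)) (fun x => x) false
              ++ PySem.List.slice arr (some h) none
  let a2 := PySem.List.slice a1 none (some h)
              ++ PySem.List.sorted (PySem.List.slice a1 (some h) none) (fun x => x) false
  -- for y in arr[half:n]: count += half - _lower_bound(arr, 0, half, 5*y)
  (PySem.List.slice a2 (some h) (some n)).foldl
    (fun c y => c + (h - lbB a2 (5 * y) 0 h)) 0

-- ===== PRECONDITION & SPEC =====
-- Pre_ excludes n > len(arr): there A indexes arr[b] past the end and in general raises IndexError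
-- (on a few such inputs A happens to return before reaching the bad index — see the cited example).
def Pre_dominantPairs (n : Int) (arr : List Int) : Prop := n ≤ (arr.length : Int)
instance (n : Int) (arr : List Int) : Decidable (Pre_dominantPairs n arr) := by
  unfold Pre_dominantPairs; infer_instance
def pvWitness_dominantPairs : Int × List Int := (4, [10, 3, 1, 2])

def Spec_dominantPairs (n : Int) (arr : List Int) (out : Int) : Prop := out = dominantPairs_alt n arr
instance (n : Int) (arr : List Int) (out : Int) : Decidable (Spec_dominantPairs n arr out) := by unfold Spec_dominantPairs; infer_instance

-- ===== CLAIM (what is proved, stated in full; the proofs are below) =====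
def Claim_equal_dominantPairs : Prop := ∀ (n : Int) (arr : List Int), Dom_dominantPairs n arr → Pre_dominantPairs n arr → Spec_dominantPairs n arr (dominantPairs n arr)

-- ===== LEMMAS AND PROOFS =====

-- number of indices i < M with x ≤ L[i]
def cntT (L : List Int) (M : Nat) (x : Int) : Nat :=
  (List.range M).countP (fun i : Nat => decide (x ≤ PySem.List.pyGetD L (i : Int) 0))

theorem countP_congr' {α : Type} (l : List α) (p q : α → Bool)
    (h : ∀ x ∈ l, p x = q x) : l.countP p = l.countP q := by
  induction l with
  | nil => rfl
  | cons a t ih =>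
    simp only [List.countP_cons, h a List.mem_cons_self]
    rw [ih (fun x hx => h x (List.mem_cons_of_mem _ hx))]

theorem countP_range_ge (M r : Nat) :
    (List.range M).countP (fun i => decide (r ≤ i)) = M - r := by
  induction M with
  | zero => simp
  | succ M ih =>
    rw [List.range_succ, List.countP_append, ih]
    by_cases h : r ≤ M <;> simp [h] <;> omega

theorem lbB_inv (L : List Int) (x : Int) (hi₀ : Int) :
    ∀ (K : Nat) (lo hi : Int), (hi - lo).toNat ≤ K → 0 ≤ lo → lo ≤ hi → hi ≤ hi₀ →
    (∀ i j : Int, 0 ≤ i → i ≤ j → j < hi₀ →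
      PySem.List.pyGetD L i 0 ≤ PySem.List.pyGetD L j 0) →
    lo ≤ lbB L x lo hi ∧ lbB L x lo hi ≤ hi ∧
    (∀ i : Int, lo ≤ i → i < lbB L x lo hi → PySem.List.pyGetD L i 0 < x) ∧
    (∀ i : Int, lbB L x lo hi ≤ i → i < hi → x ≤ PySem.List.pyGetD L i 0) := by
  intro K
  induction K with
  | zero =>
    intro lo hi hK h0 hlh hh hs
    have heq : hi = lo := by omega
    subst heq
    rw [lbB, dif_neg (lt_irrefl _)]
    exact ⟨le_refl _, le_refl _, fun i h1 h2 => absurd h2 (by omega),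
      fun i h1 h2 => absurd h2 (by omega)⟩
  | succ K ih =>
    intro lo hi hK h0 hlh hh hs
    rw [lbB]
    by_cases hg : lo < hi
    · have hmid := PySem.Int.floordiv_two_mid_bounds (le_of_lt hg)
      have hmid2 : PySem.Int.floordiv (lo + hi) 2 < hi := by
        rw [PySem.Int.floordiv_lt_iff_lt_mul (by omega)]; omega
      simp only [dif_pos hg]
      set mid := PySem.Int.floordiv (lo + hi) 2 with hmdef
      by_cases hc : PySem.List.pyGetD L mid 0 < x
      · rw [if_pos hc]
        obtain ⟨p1, p2, p3, p4⟩ := ih (mid + 1) hi (by omega) (by omega) (by omega) hh hs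
        refine ⟨by omega, p2, ?_, p4⟩
        intro i hi1 hi2
        by_cases him : i ≤ mid
        · calc PySem.List.pyGetD L i 0 ≤ PySem.List.pyGetD L mid 0 :=
                hs i mid (by omega) him (by omega)
            _ < x := hc
        · exact p3 i (by omega) hi2
      · rw [if_neg hc]
        obtain ⟨p1, p2, p3, p4⟩ := ih lo mid (by omega) h0 (by omega) (by omega) hs
        refine ⟨p1, by omega, p3, ?_⟩
        intro i hi1 hi2
        by_cases him : i < mid
        · exact p4 i hi1 him
        · calc x ≤ PySem.List.pyGetD L mid 0 := by omega
            _ ≤ PySem.List.pyGetD L i 0 := hs mid i (by omega) (by omega) (by omega)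
    · rw [dif_neg hg]
      exact ⟨le_refl _, by omega, fun i h1 h2 => absurd h2 (by omega),
        fun i h1 h2 => absurd h1 (by omega)⟩

theorem lbB_spec (L : List Int) (M : Nat)
    (hs : ∀ i j : Int, 0 ≤ i → i ≤ j → j < (M : Int) →
      PySem.List.pyGetD L i 0 ≤ PySem.List.pyGetD L j 0) (x : Int) :
    (M : Int) - lbB L x 0 (M : Int) = (cntT L M x : Int) := by
  obtain ⟨p1, p2, p3, p4⟩ :=
    lbB_inv L x (M : Int) ((M : Int) - 0).toNat 0 (M : Int) (le_refl _) (le_refl 0)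
      (by omega) (le_refl _) hs
  set r := lbB L x 0 (M : Int) with hr
  have hc : cntT L M x = M - r.toNat := by
    unfold cntT
    rw [countP_congr' _ _ (fun i => decide (r.toNat ≤ i)) ?_, countP_range_ge M r.toNat]
    intro i hi
    simp only [List.mem_range] at hi
    by_cases hir : r.toNat ≤ i
    · have h5 := p4 (i : Int) (by omega) (by omega)
      simp only [PySem.List.pyGetD_natCast, List.getD_eq_getElem?_getD] at h5
      simp [hir, h5]
    · have h3 := p3 (i : Int) (by omega) (by omega)
      have h4 : ¬ (x ≤ PySem.List.pyGetD L (i : Int) 0) := by omega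
      simp only [PySem.List.pyGetD_natCast, List.getD_eq_getElem?_getD] at h4
      simp [hir, h4]
  omega

theorem loopA_inv (L : List Int) (M : Nat) (n : Int)
    (hs1 : ∀ i j : Int, 0 ≤ i → i ≤ j → j < (M : Int) →
      PySem.List.pyGetD L i 0 ≤ PySem.List.pyGetD L j 0)
    (hs2 : ∀ i j : Int, (M : Int) ≤ i → i ≤ j → j < n →
      PySem.List.pyGetD L i 0 ≤ PySem.List.pyGetD L j 0) :
    ∀ (K : Nat) (a b count : Int), (n - b).toNat + ((M : Int) - a).toNat ≤ K →
    0 ≤ a → a ≤ (M : Int) → (M : Int) ≤ b → b ≤ n →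
    (∀ i j : Int, 0 ≤ i → i < a → b ≤ j → j < n →
      PySem.List.pyGetD L i 0 < 5 * PySem.List.pyGetD L j 0) →
    loopA L (M : Int) n a b count =
      count + ((List.range ((n - b).toNat)).map
        (fun t : Nat => (cntT L M (5 * PySem.List.pyGetD L (b + (t : Int)) 0) : Int))).sum := by
  intro K
  induction K with
  | zero =>
    intro a b count hK h0 haM hMb hbn hinv
    rw [loopA, dif_neg (by omega : ¬(a < (M : Int) ∧ b < n))]
    have hz : (n - b).toNat = 0 := by omega
    simp [hz]
  | succ K ih =>
    intro a b count hK h0 haM hMb hbn hinv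
    rw [loopA]
    by_cases hg : a < (M : Int) ∧ b < n
    · rw [dif_pos hg]
      obtain ⟨hga, hgb⟩ := hg
      have hsplit : (n - b).toNat = (n - (b + 1)).toNat + 1 := by omega
      by_cases hcmp : 5 * PySem.List.pyGetD L b 0 ≤ PySem.List.pyGetD L a 0
      · rw [if_pos hcmp]
        rw [ih a (b + 1) (count + ((M : Int) - a)) (by omega) h0 haM (by omega) (by omega)
          (fun i j h1 h2 h3 h4 => hinv i j h1 h2 (le_trans (by omega) h3) h4)]
        have hcntb : cntT L M (5 * PySem.List.pyGetD L b 0) = M - a.toNat := by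
          unfold cntT
          rw [countP_congr' _ _ (fun i => decide (a.toNat ≤ i)) ?_, countP_range_ge M a.toNat]
          intro i hi
          simp only [List.mem_range] at hi
          by_cases hia : a.toNat ≤ i
          · have hle : 5 * PySem.List.pyGetD L b 0 ≤ PySem.List.pyGetD L (i : Int) 0 :=
              le_trans hcmp (hs1 a (i : Int) h0 (by omega) (by omega))
            simp only [PySem.List.pyGetD_natCast, List.getD_eq_getElem?_getD] at hle
            simp [hia, hle]
          · have hlt := hinv (i : Int) b (by omega) (by omega) (le_refl _) hgb
            have h4 : ¬ (5 * PySem.List.pyGetD L b 0 ≤ PySem.List.pyGetD L (i : Int) 0) := by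
              omega
            simp only [PySem.List.pyGetD_natCast, List.getD_eq_getElem?_getD] at h4
            simp [hia, h4]
        have hshift : ∀ t : Nat, b + ((t + 1 : Nat) : Int) = (b + 1) + (t : Int) := by
          intro t; push_cast; ring
        rw [hsplit, List.range_succ_eq_map, List.map_cons, List.sum_cons, List.map_map]
        have hmapeq : (List.range ((n - (b + 1)).toNat)).map
              ((fun t : Nat => (cntT L M (5 * PySem.List.pyGetD L (b + (t : Int)) 0) : Int)) ∘ Nat.succ)
            = (List.range ((n - (b + 1)).toNat)).map
              (fun t : Nat => (cntT L M (5 * PySem.List.pyGetD L ((b + 1) + (t : Int)) 0) : Int)) := by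
          apply List.map_congr_left
          intro t _
          simp only [Function.comp_apply]
          rw [show ((Nat.succ t : Nat) : Int) = (t : Int) + 1 by omega]
          rw [show b + ((t : Int) + 1) = (b + 1) + (t : Int) by ring]
        simp only [Nat.cast_zero, add_zero]
        rw [hmapeq, hcntb]
        have hMa : ((M - a.toNat : Nat) : Int) = (M : Int) - a := by omega
        rw [hMa]
        ring
      · rw [if_neg hcmp]
        apply ih (a + 1) b count (by omega) (by omega) (by omega) hMb hbn
        intro i j h1 h2 h3 h4
        by_cases hia : i < a
        · exact hinv i j h1 hia h3 h4
        · have hieq : i = a := by omega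
          subst hieq
          have hbj : PySem.List.pyGetD L b 0 ≤ PySem.List.pyGetD L j 0 :=
            hs2 b j hMb h3 h4
          omega
    · rw [dif_neg hg]
      by_cases hbn' : b < n
      · -- then a = M : every remaining count is 0
        have haM' : a = (M : Int) := by omega
        have hz : ∀ t ∈ List.range ((n - b).toNat),
            (fun t : Nat => (cntT L M (5 * PySem.List.pyGetD L (b + (t : Int)) 0) : Int)) t = 0 := by
          intro t ht
          simp only [List.mem_range] at ht
          have : cntT L M (5 * PySem.List.pyGetD L (b + (t : Int)) 0) = 0 := by
            unfold cntT
            rw [List.countP_eq_zero]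
            intro i hi
            simp only [List.mem_range] at hi
            have := hinv (i : Int) (b + (t : Int)) (by omega) (by omega) (by omega) (by omega)
            simp only [decide_eq_true_eq]
            omega
          simp [this]
        rw [List.sum_eq_zero]
        · omega
        · intro x hx
          obtain ⟨t, ht, rfl⟩ := List.mem_map.mp hx
          exact hz t ht
      · have : (n - b).toNat = 0 := by omega
        simp [this]

theorem slice_nil_of_neg {α : Type} (xs : List α) (a b : Int) (ha : a < 0) (hab : b ≤ a) :
    PySem.List.slice xs (some a) (some b) = [] := by
  apply List.eq_nil_of_length_eq_zero
  rw [PySem.List.length_slice]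
  unfold PySem.List.clampIdx
  split_ifs <;> omega

-- the list segment L[m:m+k] written as a map over its index range
theorem seg_eq_map (L : List Int) (m k : Nat) (hk : m + k ≤ L.length) :
    (L.drop m).take k
      = (List.range k).map (fun t : Nat => PySem.List.pyGetD L ((m + t : Nat) : Int) 0) := by
  apply List.ext_getElem
  · simp; omega
  · intro i h1 h2
    have him : m + i < L.length := by simp at h1; omega
    simp only [List.getElem_take, List.getElem_drop, List.getElem_map, List.getElem_range]
    rw [PySem.List.pyGetD_natCast]
    simp [List.getD_eq_getElem?_getD, List.getElem?_eq_getElem him]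

-- ===== VERDICT (by name: the statement is the Claim_ definition above) =====
theorem dominantPairs_spec : Claim_equal_dominantPairs := by
  intro n arr _hdom hpre
  unfold Pre_dominantPairs at hpre
  unfold Spec_dominantPairs
  simp only [dominantPairs, dominantPairs_alt]
  by_cases hn0 : 0 ≤ n
  · -- 0 ≤ n ≤ len arr
    have hn : n = ((n.toNat : Nat) : Int) := by omega
    set N := n.toNat with hN
    set M := N / 2 with hM
    have hMN : M ≤ N := Nat.div_le_self _ _
    have hNlen : N ≤ arr.length := by omega
    have hfd : PySem.Int.floordiv n 2 = ((M : Nat) : Int) := by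
      rw [hn]; exact_mod_cast PySem.Int.floordiv_natCast N 2
    rw [hfd]
    simp only [PySem.List.slice_to_natCast, PySem.List.slice_from_natCast]
    set F := PySem.List.sorted (arr.take M) (fun x => x) false with hFdef
    have hF : F.length = M := by
      rw [hFdef, PySem.List.length_sorted, List.length_take]; omega
    rw [List.take_left' hF, List.drop_left' hF]
    set S0 := PySem.List.sorted (arr.drop M) (fun x => x) false with hSdef
    set L := F ++ S0 with hLdef
    have hLlen : L.length = arr.length := by
      rw [hLdef, List.length_append, hF, hSdef, PySem.List.length_sorted, List.length_drop]
      omega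
    have hS0len : S0.length = arr.length - M := by
      rw [hSdef, PySem.List.length_sorted, List.length_drop]
    have hpF : List.Pairwise (fun a b => a ≤ b) F := by
      rw [hFdef]; exact PySem.List.sorted_pairwise (arr.take M) (fun x => x)
    have hpS : List.Pairwise (fun a b => a ≤ b) S0 := by
      rw [hSdef]; exact PySem.List.sorted_pairwise (arr.drop M) (fun x => x)
    -- sortedness of the first half inside L
    have hs1 : ∀ i j : Int, 0 ≤ i → i ≤ j → j < ((M : Nat) : Int) →
        PySem.List.pyGetD L i 0 ≤ PySem.List.pyGetD L j 0 := by
      intro i j h1 h2 h3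
      rw [PySem.List.pyGetD_eq_getElem L 0 h1 (by omega),
          PySem.List.pyGetD_eq_getElem L 0 (by omega) (by omega)]
      rw [List.getElem_append_left (by omega : i.toNat < F.length),
          List.getElem_append_left (by omega : j.toNat < F.length)]
      rcases eq_or_lt_of_le h2 with he | hl
      · subst he; exact le_refl _
      · exact List.pairwise_iff_getElem.mp hpF i.toNat j.toNat (by omega) (by omega) (by omega)
    -- sortedness of the second half inside L
    have hs2 : ∀ i j : Int, ((M : Nat) : Int) ≤ i → i ≤ j → j < n →
        PySem.List.pyGetD L i 0 ≤ PySem.List.pyGetD L j 0 := by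
      intro i j h1 h2 h3
      rw [PySem.List.pyGetD_eq_getElem L 0 (by omega) (by omega),
          PySem.List.pyGetD_eq_getElem L 0 (by omega) (by omega)]
      rw [List.getElem_append_right (by omega : F.length ≤ i.toNat),
          List.getElem_append_right (by omega : F.length ≤ j.toNat)]
      rcases eq_or_lt_of_le h2 with he | hl
      · subst he; exact le_refl _
      · exact List.pairwise_iff_getElem.mp hpS (i.toNat - F.length) (j.toNat - F.length)
          (by omega) (by omega) (by omega)
    -- A's loop
    rw [loopA_inv L M n hs1 hs2 ((n - ((M : Nat) : Int)).toNat + (((M : Nat) : Int) - 0).toNat)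
        0 ((M : Nat) : Int) 0 (le_refl _) (le_refl 0) (by omega) (le_refl _) (by omega)
        (fun i j h1 h2 h3 h4 => absurd h2 (by omega))]
    -- B's slice and fold
    rw [hn, PySem.List.slice_natCast, PySem.List.foldl_add]
    rw [seg_eq_map L M (N - M) (by omega)]
    rw [List.map_map]
    have hmap : (List.range (N - M)).map
          ((fun y => ((M : Nat) : Int) - lbB L (5 * y) 0 ((M : Nat) : Int)) ∘
            (fun t : Nat => PySem.List.pyGetD L ((M + t : Nat) : Int) 0))
        = (List.range ((n - ((M : Nat) : Int)).toNat)).map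
          (fun t : Nat => (cntT L M (5 * PySem.List.pyGetD L (((M : Nat) : Int) + (t : Int)) 0) : Int)) := by
      have hrange : (n - ((M : Nat) : Int)).toNat = N - M := by omega
      rw [hrange]
      apply List.map_congr_left
      intro t ht
      simp only [Function.comp_apply]
      rw [show ((M + t : Nat) : Int) = ((M : Nat) : Int) + (t : Int) by push_cast; ring]
      exact lbB_spec L M hs1 _
    rw [hmap, hn]
  · -- n < 0 : both sides are 0
    have hf := PySem.Int.floordiv_mul_add_mod n 2
    have hm0 := PySem.Int.mod_nonneg n (by norm_num : (0:Int) < 2)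
    have hm2 := PySem.Int.mod_lt n (by norm_num : (0:Int) < 2)
    have hh : PySem.Int.floordiv n 2 < 0 ∧ n ≤ PySem.Int.floordiv n 2 := by omega
    rw [loopA, dif_neg (by omega : ¬(0 < PySem.Int.floordiv n 2 ∧ PySem.Int.floordiv n 2 < n))]
    rw [slice_nil_of_neg _ _ _ hh.1 hh.2]
    rfl
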